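-- pv_equiv track=rewrite | github.com/Pranavi2002/CodePath-TP-102-Course | Unit-3/s2v2p3.py | terrain_elevation_match
-- ===== SOURCE A (Python) =====
-- def terrain_elevation_match(terrain):
--   n = len(terrain)
--   low = 0
--   high = n
--   result = []
--   for t in terrain:
--     if t == 'I':
--       result.append(low)
--       low += 1
--     else:
--       result.append(high)
--       high -= 1
--   result.append(high)
--   return result
-- ===== SOURCE B (Python) =====
-- def terrain_elevation_match(terrain):
--   n = len(terrain)
--   result = [0] * (n + 1)
--   low = 0
--   for i, t in enumerate(terrain):
--     if t == 'I':
--       result[i] = low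
--       low += 1
--   high = n
--   for i, t in enumerate(terrain):
--     if t != 'I':
--       result[i] = high
--       high -= 1
--   result[n] = low
--   return result
-- ===== Notes on version B (the rewrite author's own statement) =====
-- stated objective: alternative
-- what changed: Replaces A's single interleaved append loop (building the result left-to-right while juggling both counters) with a preallocated index array filled by two category-specific passes: one pass writes ascending values into the 'I' positions, a second writes descending values into the other positions, and the final slot gets the count of 'I's.
import Mathlib
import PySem

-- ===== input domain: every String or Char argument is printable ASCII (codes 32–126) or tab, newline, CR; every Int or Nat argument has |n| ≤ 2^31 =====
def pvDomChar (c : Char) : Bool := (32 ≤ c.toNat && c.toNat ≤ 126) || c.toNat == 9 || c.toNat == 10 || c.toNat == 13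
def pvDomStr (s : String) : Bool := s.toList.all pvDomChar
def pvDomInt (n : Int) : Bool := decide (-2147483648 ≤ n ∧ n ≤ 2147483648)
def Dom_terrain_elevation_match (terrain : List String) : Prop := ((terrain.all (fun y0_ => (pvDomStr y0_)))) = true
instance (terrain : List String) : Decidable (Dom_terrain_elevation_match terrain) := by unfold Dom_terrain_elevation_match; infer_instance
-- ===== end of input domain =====

-- B rewrites A's single interleaved append loop as two category-specific index-writing
-- passes into a preallocated array (alternative decomposition, same O(n) cost).

-- ===== PORT A =====
-- A's for-loop over terrain carrying (low, high, result), then the trailing append of high.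
def teLoopA : List String → Int → Int → List Int → List Int
  | [], _, high, result => result ++ [high]
  | t :: ts, low, high, result =>
      if t == "I" then teLoopA ts (low + 1) high (result ++ [low])
      else teLoopA ts low (high - 1) (result ++ [high])

def terrain_elevation_match (terrain : List String) : List Int :=
  teLoopA terrain 0 (terrain.length : Int) []

-- ===== PORT B =====
-- first pass of Source B: for i, t in enumerate(terrain): if t == 'I': result[i] = low; low += 1
def tePassI : List (Int × String) → List Int → Int → List Int × Int
  | [], result, low => (result, low)
  | (i, t) :: rest, result, low =>
      if t == "I" then tePassI rest (PySem.List.pySetD result i low) (low + 1)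
      else tePassI rest result low

-- second pass of Source B: for i, t in enumerate(terrain): if t != 'I': result[i] = high; high -= 1
def tePassD : List (Int × String) → List Int → Int → List Int × Int
  | [], result, high => (result, high)
  | (i, t) :: rest, result, high =>
      if t != "I" then tePassD rest (PySem.List.pySetD result i high) (high - 1)
      else tePassD rest result high

def terrain_elevation_match_alt (terrain : List String) : List Int :=
  let n : Int := (terrain.length : Int)
  let result := List.replicate (terrain.length + 1) (0 : Int)
  let p1 := tePassI (PySem.List.enumerate terrain 0) result 0
  let p2 := tePassD (PySem.List.enumerate terrain 0) p1.1 n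
  PySem.List.pySetD p2.1 n p1.2

-- ===== PRECONDITION & SPEC =====
def Spec_terrain_elevation_match (terrain : List String) (out : List Int) : Prop := out = terrain_elevation_match_alt terrain
instance (terrain : List String) (out : List Int) : Decidable (Spec_terrain_elevation_match terrain out) := by unfold Spec_terrain_elevation_match; infer_instance

-- ===== CLAIM (what is proved, stated in full; the proofs are below) =====
def Claim_equal_terrain_elevation_match : Prop := ∀ (terrain : List String), Dom_terrain_elevation_match terrain → Spec_terrain_elevation_match terrain (terrain_elevation_match terrain)

-- ===== LEMMAS AND PROOFS =====

-- number of 'I' / non-'I' entries, as Ints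
def teCntI : List String → Int
  | [] => 0
  | t :: ts => (if t == "I" then 1 else 0) + teCntI ts

def teCntD : List String → Int
  | [] => 0
  | t :: ts => (if t == "I" then 0 else 1) + teCntD ts

-- the per-position values produced by A's loop (without the trailing append)
def teGo : List String → Int → Int → List Int
  | [], _, _ => []
  | t :: ts, low, high =>
      if t == "I" then low :: teGo ts (low + 1) high else high :: teGo ts low (high - 1)

-- effect of B's first pass on the written segment
def teApplyI : List String → Int → List Int → List Int
  | [], _, mid => mid
  | _ :: _, _, [] => []
  | t :: ts, low, m :: mid =>
      if t == "I" then low :: teApplyI ts (low + 1) mid else m :: teApplyI ts low mid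

-- effect of B's second pass on the written segment
def teApplyD : List String → Int → List Int → List Int
  | [], _, mid => mid
  | _ :: _, _, [] => []
  | t :: ts, high, m :: mid =>
      if t == "I" then m :: teApplyD ts high mid else high :: teApplyD ts (high - 1) mid

theorem teSet_len_append (pre : List Int) (x v : Int) (rest : List Int) :
    (pre ++ x :: rest).set pre.length v = pre ++ v :: rest := by
  induction pre with
  | nil => simp
  | cons a pre ih => simp [ih]

theorem teCnt_total (ts : List String) : teCntI ts + teCntD ts = (ts.length : Int) := by
  induction ts with
  | nil => simp [teCntI, teCntD]
  | cons t ts ih =>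
      by_cases h : t = "I" <;> simp [teCntI, teCntD, h] <;> omega

theorem teGo_length (ts : List String) (low high : Int) : (teGo ts low high).length = ts.length := by
  induction ts generalizing low high with
  | nil => rfl
  | cons t ts ih => by_cases h : t = "I" <;> simp [teGo, h, ih]

theorem teApplyI_length (ts : List String) (low : Int) (mid : List Int)
    (h : mid.length = ts.length) : (teApplyI ts low mid).length = ts.length := by
  induction ts generalizing low mid with
  | nil => simpa [teApplyI] using h
  | cons t ts ih =>
      cases mid with
      | nil => simp at h
      | cons m mid =>
          by_cases ht : t = "I" <;> simp [teApplyI, ht] <;>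
            exact ih _ _ (by simpa using h)

theorem teLoopA_eq (ts : List String) (low high : Int) (res : List Int) :
    teLoopA ts low high res = res ++ teGo ts low high ++ [high - teCntD ts] := by
  induction ts generalizing low high res with
  | nil => simp [teLoopA, teGo, teCntD]
  | cons t ts ih =>
      by_cases h : t = "I"
      · simp [teLoopA, teGo, teCntD, h, ih]
      · simp [teLoopA, teGo, teCntD, h, ih]
        ring_nf

theorem tePassI_eq (ts : List String) (s : Nat) (pre mid tail : List Int) (low : Int)
    (hpre : pre.length = s) (hmid : mid.length = ts.length) :
    tePassI (PySem.List.enumerate ts (s : Int)) (pre ++ mid ++ tail) low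
      = (pre ++ teApplyI ts low mid ++ tail, low + teCntI ts) := by
  induction ts generalizing s pre mid low with
  | nil =>
      cases mid with
      | nil => simp [tePassI, teApplyI, teCntI, PySem.List.enumerate]
      | cons m mid => simp at hmid
  | cons t ts ih =>
      cases mid with
      | nil => simp at hmid
      | cons m mid =>
          rw [PySem.List.enumerate_cons]
          have hs1 : ((s : Int) + 1) = ((s + 1 : Nat) : Int) := by push_cast; ring
          by_cases ht : t = "I"
          · have hset : PySem.List.pySetD (pre ++ (m :: mid) ++ tail) (s : Int) low
                = (pre ++ [low]) ++ mid ++ tail := by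
              rw [PySem.List.pySetD_natCast, ← hpre]
              simp
            simp only [tePassI, ht, beq_self_eq_true, if_true, hset, hs1]
            rw [ih (s + 1) (pre ++ [low]) mid (low + 1) (by simp [hpre]) (by simpa using hmid)]
            simp [teApplyI, teCntI]
            ring
          · have hassoc : pre ++ (m :: mid) ++ tail = (pre ++ [m]) ++ mid ++ tail := by simp
            simp only [tePassI, hs1, hassoc]
            rw [if_neg (by simp [ht])]
            rw [ih (s + 1) (pre ++ [m]) mid low (by simp [hpre]) (by simpa using hmid)]
            simp [teApplyI, teCntI, if_neg ht]

theorem tePassD_eq (ts : List String) (s : Nat) (pre mid tail : List Int) (high : Int)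
    (hpre : pre.length = s) (hmid : mid.length = ts.length) :
    tePassD (PySem.List.enumerate ts (s : Int)) (pre ++ mid ++ tail) high
      = (pre ++ teApplyD ts high mid ++ tail, high - teCntD ts) := by
  induction ts generalizing s pre mid high with
  | nil =>
      cases mid with
      | nil => simp [tePassD, teApplyD, teCntD, PySem.List.enumerate]
      | cons m mid => simp at hmid
  | cons t ts ih =>
      cases mid with
      | nil => simp at hmid
      | cons m mid =>
          rw [PySem.List.enumerate_cons]
          have hs1 : ((s : Int) + 1) = ((s + 1 : Nat) : Int) := by push_cast; ring
          by_cases ht : t = "I"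
          · have hassoc : pre ++ (m :: mid) ++ tail = (pre ++ [m]) ++ mid ++ tail := by simp
            simp only [tePassD, hs1, hassoc]
            rw [if_neg (by simp [ht])]
            rw [ih (s + 1) (pre ++ [m]) mid high (by simp [hpre]) (by simpa using hmid)]
            simp [teApplyD, teCntD, ht]
          · have hset : PySem.List.pySetD (pre ++ (m :: mid) ++ tail) (s : Int) high
                = (pre ++ [high]) ++ mid ++ tail := by
              rw [PySem.List.pySetD_natCast, ← hpre]
              simp
            simp only [tePassD, hs1]
            rw [if_pos (by simp [ht]), hset]
            rw [ih (s + 1) (pre ++ [high]) mid (high - 1) (by simp [hpre]) (by simpa using hmid)]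
            simp [teApplyD, teCntD, ht]
            ring

theorem teApply_comp (ts : List String) (low high : Int) (mid : List Int)
    (hmid : mid.length = ts.length) :
    teApplyD ts high (teApplyI ts low mid) = teGo ts low high := by
  induction ts generalizing low high mid with
  | nil =>
      obtain rfl := List.length_eq_zero_iff.mp (by simpa using hmid)
      simp [teApplyI, teApplyD, teGo]
  | cons t ts ih =>
      cases mid with
      | nil => simp at hmid
      | cons m mid =>
          by_cases ht : t = "I" <;>
            simp [teApplyI, teApplyD, teGo, ht, ih _ _ mid (by simpa using hmid)]

-- ===== VERDICT (by name: the statement is the Claim_ definition above) =====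
theorem terrain_elevation_match_spec : Claim_equal_terrain_elevation_match := by
  intro ts _
  unfold Spec_terrain_elevation_match terrain_elevation_match terrain_elevation_match_alt
  dsimp only
  have hP1 := tePassI_eq ts 0 [] (List.replicate ts.length 0) [0] 0 rfl (by simp)
  have hlen : (teApplyI ts 0 (List.replicate ts.length 0)).length = ts.length :=
    teApplyI_length ts 0 _ (by simp)
  have hP2 := tePassD_eq ts 0 [] (teApplyI ts 0 (List.replicate ts.length 0)) [0]
      (ts.length : Int) rfl hlen
  simp only [Nat.cast_zero, List.nil_append] at hP1 hP2
  have hrep : List.replicate (ts.length + 1) (0 : Int)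
      = List.replicate ts.length (0 : Int) ++ [0] := by
    simp [List.replicate_succ']
  rw [hrep, hP1, hP2, teApply_comp ts 0 (ts.length : Int) _ (by simp), teLoopA_eq,
    PySem.List.pySetD_natCast]
  have hfin := teSet_len_append (teGo ts 0 (ts.length : Int)) 0 (0 + teCntI ts) []
  rw [teGo_length] at hfin
  rw [hfin]
  have := teCnt_total ts
  have hval : (ts.length : Int) - teCntD ts = 0 + teCntI ts := by omega
  simp [hval]
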